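-- pv_equiv track=rewrite | github.com/NCAS-CMS/s3view | cfs3/drs_view.py | drs_select
-- ===== SOURCE A (Python) =====
-- def parse_filename_to_drs_components(filename, drs=None) -> dict:
--     """
--     Return dictionary of filenanme components or raise a ValueError
--     if the filename doesn't match the DRS.
--
--     If DRS is none, then simply return an enumeration
--     of parts as a dictionary.
--
--     """
--     parts = filename.split('.')[0].split('_')
--     if drs is None:
--         return {i:p for i,p in enumerate(parts)}
--     else:
--         if len(parts) != len(drs):
--             raise ValueError('Filename does not match DRS')
--         else:
--             return {k:p for k,p in zip(drs,parts)}
--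
-- def drs_select(files, selections, drs):
--     """ Process files for DRS matches to selection """
--     results, skipped = [], []
--     drsc = drs.split(',')
--     for f in files:
--         try:
--             parsed = parse_filename_to_drs_components(f['n'], drsc)
--             if all(parsed.get(k) == v for k,v in selections.items()):
--                 results.append(f)
--         except ValueError:
--             skipped.append(f)
--     return results, skipped
-- ===== SOURCE B (Python) =====
-- def drs_select(files, selections, drs):
--     """ Process files for DRS matches to selection """
--     drsc = drs.split(',')
--     n = len(drsc)
--     pos = {k: i for i, k in enumerate(drsc)}          # last occurrence wins, like dict(zip(drsc, parts))
--     # stage 1: parse every filename once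
--     tagged = [(f, f['n'].split('.')[0].split('_')) for f in files]
--     # stage 2: partition by part count
--     skipped = [f for f, parts in tagged if len(parts) != n]
--     candidates = [fp for fp in tagged if len(fp[1]) == n]
--     # stage 3: one filtering pass over the candidates per selection criterion
--     for k, v in selections.items():
--         p = pos.get(k)
--         candidates = [fp for fp in candidates if p is not None and fp[1][p] == v]
--     return [f for f, _ in candidates], skipped
-- ===== Notes on version B (the rewrite author's own statement) =====
-- stated objective: alternative
-- what changed: B inverts the loop nesting: it parses all filenames once, partitions them by part count in staged list comprehensions, and then applies each selection criterion as a separate filtering pass over the surviving candidates (outer loop over selections, not over files), using a precomputed key-to-position map instead of a per-file dict and exception handling.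
import Mathlib
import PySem

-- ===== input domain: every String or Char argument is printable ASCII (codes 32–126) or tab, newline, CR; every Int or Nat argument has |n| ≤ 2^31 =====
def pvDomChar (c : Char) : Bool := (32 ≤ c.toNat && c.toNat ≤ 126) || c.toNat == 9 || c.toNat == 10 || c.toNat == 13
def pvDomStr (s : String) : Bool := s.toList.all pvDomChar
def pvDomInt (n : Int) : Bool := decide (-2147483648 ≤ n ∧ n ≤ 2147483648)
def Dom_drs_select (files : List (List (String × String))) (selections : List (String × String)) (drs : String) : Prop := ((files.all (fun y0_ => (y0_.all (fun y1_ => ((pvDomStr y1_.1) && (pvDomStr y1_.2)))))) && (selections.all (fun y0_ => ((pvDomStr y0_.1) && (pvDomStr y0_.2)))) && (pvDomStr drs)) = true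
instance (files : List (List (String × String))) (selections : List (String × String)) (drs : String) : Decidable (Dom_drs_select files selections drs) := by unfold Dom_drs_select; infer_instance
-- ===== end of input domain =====

-- B inverts the loop nesting: parse all filenames once, partition by part count, then apply each
-- selection criterion as a separate filtering pass over the candidates (objective: alternative).
-- Equivalence on inputs where every file has key 'n' (else Python raises KeyError).


-- ===== PORT A =====
-- shared subexpression of both Pythons: filename.split('.')[0].split('_')
def splitParts (filename : String) : List String :=
  (PySem.Str.split? (((PySem.Str.split? filename ".").getD []).headD "") "_").getD []

-- parse_filename_to_drs_components with drs a list (the only way drs_select calls it);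
-- 'raise ValueError' is modelled as none.
def parse_filename_to_drs_components? (filename : String) (drs : List String) :
    Option (PySem.Dict String String) :=
  let parts := splitParts filename
  if parts.length ≠ drs.length then none
  else some (PySem.Dict.ofList (drs.zip parts))

def drs_select (files : List (List (String × String))) (selections : List (String × String)) (drs : String) : (List (List (String × String))) × (List (List (String × String))) :=
  let drsc := (PySem.Str.split? drs ",").getD []
  files.foldl (fun acc f =>
    -- f['n']: total via getD, exact under Pre_ (key 'n' present)
    match parse_filename_to_drs_components? ((PySem.Dict.ofList f).getD "n" "") drsc with
    | none => (acc.1, acc.2 ++ [f])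
    | some parsed =>
        if (PySem.Dict.ofList selections).items.all (fun kv => parsed.get? kv.1 == some kv.2)
        then (acc.1 ++ [f], acc.2) else acc) ([], [])

-- ===== PORT B =====
def drs_select_alt (files : List (List (String × String))) (selections : List (String × String)) (drs : String) : (List (List (String × String))) × (List (List (String × String))) :=
  let drsc := (PySem.Str.split? drs ",").getD []
  let n := drsc.length
  let pos : PySem.Dict String Int :=
    PySem.Dict.ofList ((PySem.List.enumerate drsc 0).map (fun ik => (ik.2, ik.1)))
  let tagged := files.map (fun f => (f, splitParts ((PySem.Dict.ofList f).getD "n" "")))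
  let skipped := (tagged.filter (fun fp => fp.2.length != n)).map (·.1)
  let candidates := tagged.filter (fun fp => fp.2.length == n)
  let final := (PySem.Dict.ofList selections).items.foldl (fun cand kv =>
      cand.filter (fun fp =>
        match pos.get? kv.1 with
        | none => false
        | some p => PySem.List.pyGetD fp.2 p "" == kv.2)) candidates
  (final.map (·.1), skipped)

-- ===== PRECONDITION & SPEC =====
-- Pre_ excludes exactly the inputs where some file dict lacks the key 'n': there Python A raises KeyError (B too).
def Pre_drs_select (files : List (List (String × String))) (selections : List (String × String)) (drs : String) : Prop :=
  (files.all (fun f => f.any (fun p => p.1 == "n"))) = true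
instance (files : List (List (String × String))) (selections : List (String × String)) (drs : String) : Decidable (Pre_drs_select files selections drs) := by unfold Pre_drs_select; infer_instance

def pvWitness_drs_select : (List (List (String × String))) × (List (String × String)) × String :=
  ([[("n", "a_b.nc")], [("n", "c")]], [("k1", "a")], "k1,k2")

def Spec_drs_select (files : List (List (String × String))) (selections : List (String × String)) (drs : String) (out : (List (List (String × String))) × (List (List (String × String)))) : Prop := out = drs_select_alt files selections drs
instance (files : List (List (String × String))) (selections : List (String × String)) (drs : String) (out : (List (List (String × String))) × (List (List (String × String)))) : Decidable (Spec_drs_select files selections drs out) := by unfold Spec_drs_select; infer_instance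

-- ===== CLAIM (what is proved, stated in full; the proofs are below) =====
def Claim_equal_drs_select : Prop := ∀ (files : List (List (String × String))) (selections : List (String × String)) (drs : String), Dom_drs_select files selections drs → Pre_drs_select files selections drs → Spec_drs_select files selections drs (drs_select files selections drs)

-- ===== LEMMAS AND PROOFS =====

def pvParts (f : List (String × String)) : List String :=
  splitParts ((PySem.Dict.ofList f).getD "n" "")

theorem dict_ofList_append_singleton {V : Type} (l : List (String × V)) (x : String × V) :
    PySem.Dict.ofList (l ++ [x]) = (PySem.Dict.ofList l).insert x.1 x.2 := by
  simp [PySem.Dict.ofList, PySem.Dict.update, List.foldl_append]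

-- dict(pairs) looks up the value of the LAST matching pair
theorem get?_ofList {V : Type} (l : List (String × V)) (k : String) :
    (PySem.Dict.ofList l).get? k = ((l.filter (fun p => p.1 == k)).map (·.2)).getLast? := by
  induction l using List.reverseRecOn with
  | nil => simp [PySem.Dict.ofList, PySem.Dict.update, PySem.Dict.empty, PySem.Dict.get?]
  | append_singleton l x ih =>
      rw [dict_ofList_append_singleton, PySem.Dict.get?_insert, List.filter_append]
      by_cases h : x.1 = k
      · rw [if_pos h.symm]
        simp [h]
      · have hx : List.filter (fun p => p.1 == k) [x] = [] := by simp [h]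
        rw [hx, List.append_nil, if_neg (fun hh => h hh.symm), ih]

theorem aux_positions (drsc : List String) (full : List String) (s : Nat) (k : String)
    (h : drsc.length + s = full.length) :
    ((((PySem.List.enumerate drsc (s : Int)).map (fun ik => (ik.2, ik.1))).filter
        (fun p => p.1 == k)).map (fun q => PySem.List.pyGetD full q.2 "")) =
    (((drsc.zip (full.drop s)).filter (fun p => p.1 == k)).map (·.2)) := by
  induction drsc generalizing s with
  | nil => simp [PySem.List.enumerate_nil]
  | cons d rest ih =>
      have hs : s < full.length := by simp at h; omega
      have hdrop : full.drop s = full[s] :: full.drop (s + 1) := (List.getElem_cons_drop hs).symm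
      rw [PySem.List.enumerate_cons, hdrop]
      have hget : PySem.List.pyGetD full (s : Int) "" = full[s] := by
        rw [PySem.List.pyGetD_natCast]; exact List.getD_eq_getElem _ _ hs
      have ihs := ih (s + 1) (by simp at h ⊢; omega)
      push_cast at ihs
      by_cases hk : (d == k) = true
      · simp [hk, hget, ihs]
        rw [hdrop, List.zip_cons_cons]
        simp [hk]
      · simp [hk, ihs]
        rw [hdrop, List.zip_cons_cons]
        simp [hk]

-- the per-key bridge: dict(zip(drsc, parts)).get(k) = parts[pos[k]] (last occurrence)
theorem get?_zip_eq_pos (drsc parts : List String) (k : String) (h : parts.length = drsc.length) :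
    (PySem.Dict.ofList (drsc.zip parts)).get? k =
    ((PySem.Dict.ofList ((PySem.List.enumerate drsc 0).map (fun ik => (ik.2, ik.1)))).get? k).map
      (fun p => PySem.List.pyGetD parts p "") := by
  rw [get?_ofList, get?_ofList, ← List.getLast?_map, List.map_map]
  congr 1
  have := aux_positions drsc parts 0 k (by omega)
  simp only [Nat.cast_zero, List.drop_zero] at this
  simp only [Function.comp_def]
  exact this.symm

-- a chain of filtering passes is one filter by the conjunction of the criteria
theorem foldl_filter_all {ι α : Type} (q : ι → α → Bool) :
    ∀ (items : List ι) (init : List α),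
      items.foldl (fun c kv => c.filter (q kv)) init =
      init.filter (fun x => items.all (fun kv => q kv x)) := by
  intro items
  induction items with
  | nil => intro init; simp
  | cons kv rest ih =>
      intro init
      rw [List.foldl_cons, ih, List.filter_filter]
      exact List.filter_congr fun a _ => Bool.and_comm _ _

-- characterization of A's single accumulating pass
theorem A_char (drsc : List String) (selections : List (String × String)) :
    ∀ (files : List (List (String × String))) (s : (List (List (String × String))) × (List (List (String × String)))),
      files.foldl (fun acc f =>
        match parse_filename_to_drs_components? ((PySem.Dict.ofList f).getD "n" "") drsc with
        | none => (acc.1, acc.2 ++ [f])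
        | some parsed =>
            if (PySem.Dict.ofList selections).items.all (fun kv => parsed.get? kv.1 == some kv.2)
            then (acc.1 ++ [f], acc.2) else acc) s
      = (s.1 ++ files.filter (fun f => ((pvParts f).length == drsc.length) &&
            (PySem.Dict.ofList selections).items.all
              (fun kv => (PySem.Dict.ofList (drsc.zip (pvParts f))).get? kv.1 == some kv.2)),
         s.2 ++ files.filter (fun f => !((pvParts f).length == drsc.length))) := by
  intro files
  induction files with
  | nil => intro s; simp
  | cons f rest ih =>
      intro s
      rw [List.foldl_cons, ih]
      by_cases hlen : (pvParts f).length = drsc.length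
      · have hlen' : (splitParts ((PySem.Dict.ofList f).getD "n" "")).length = drsc.length := hlen
        have hp : parse_filename_to_drs_components? ((PySem.Dict.ofList f).getD "n" "") drsc
            = some (PySem.Dict.ofList (drsc.zip (pvParts f))) := by
          simp [parse_filename_to_drs_components?, pvParts, hlen']
        rw [hp]
        by_cases hacc : (PySem.Dict.ofList selections).items.all
            (fun kv => (PySem.Dict.ofList (drsc.zip (pvParts f))).get? kv.1 == some kv.2) = true
        · simp [hlen, hacc]
        · rw [Bool.not_eq_true] at hacc
          simp [hlen, hacc]
      · have hlen' : ¬ (splitParts ((PySem.Dict.ofList f).getD "n" "")).length = drsc.length := hlen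
        have hp : parse_filename_to_drs_components? ((PySem.Dict.ofList f).getD "n" "") drsc
            = none := by
          simp [parse_filename_to_drs_components?, hlen']
        rw [hp]
        simp [hlen]

-- the per-file accept condition of A equals B's positional check (when part count matches)
theorem accept_eq_check (selections : List (String × String)) (drsc parts : List String)
    (h : parts.length = drsc.length) :
    ((PySem.Dict.ofList selections).items.all
        (fun kv => (PySem.Dict.ofList (drsc.zip parts)).get? kv.1 == some kv.2)) =
    ((PySem.Dict.ofList selections).items.all (fun kv =>
        match (PySem.Dict.ofList ((PySem.List.enumerate drsc 0).map (fun ik => (ik.2, ik.1)))).get? kv.1 with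
        | none => false
        | some p => PySem.List.pyGetD parts p "" == kv.2)) := by
  apply congrArg
  funext kv
  rw [get?_zip_eq_pos drsc parts kv.1 h]
  cases hk : (PySem.Dict.ofList ((PySem.List.enumerate drsc 0).map (fun ik => (ik.2, ik.1)))).get? kv.1 with
  | none => simp
  | some p => simp

-- ===== VERDICT (by name: the statement is the Claim_ definition above) =====
theorem drs_select_spec : Claim_equal_drs_select := by
  intro files selections drs _ _
  unfold Spec_drs_select
  simp only [drs_select, drs_select_alt]
  rw [A_char, foldl_filter_all]
  rw [List.filter_filter, List.filter_map, List.filter_map, List.map_map, List.map_map]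
  simp only [List.nil_append, Function.comp_def, List.map_id']
  refine congrArg₂ Prod.mk (List.filter_congr ?_) (List.filter_congr ?_)
  · intro f _
    simp only [pvParts]
    by_cases hlen : (splitParts ((PySem.Dict.ofList f).getD "n" "")).length
        = ((PySem.Str.split? drs ",").getD []).length
    · simp only [hlen, beq_self_eq_true, Bool.true_and, Bool.and_true]
      exact accept_eq_check selections _ _ hlen
    · have hf : ((splitParts ((PySem.Dict.ofList f).getD "n" "")).length
          == ((PySem.Str.split? drs ",").getD []).length) = false := by
        exact beq_eq_false_iff_ne.mpr hlen
      rw [hf]; simp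
  · intro f _
    rfl
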